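-- pv_equiv track=rewrite | github.com/Tahmwellrups/six_men_morris | six_men_morris.py | global_piece_moves
-- ===== SOURCE A (Python) =====
-- ROW_COUNT = 5
--
-- COLUMN_COUNT = 5
--
-- def global_piece_moves(board, piece):
--     # Check for existing pieces that can be moved
--     possible_moves = []
--     # Check for empty spots to place a new piece
--     for r in range(ROW_COUNT):
--         for c in range(COLUMN_COUNT):
--             if board[r][c] == piece:
--                 for dr in range(ROW_COUNT):
--                     for dc in range(COLUMN_COUNT):
--                         if board[dr][dc] == 0:
--                             possible_moves.append(((r, c), (dr, dc)))
--     return possible_moves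
-- ===== SOURCE B (Python) =====
-- ROW_COUNT = 5
--
-- COLUMN_COUNT = 5
--
-- def global_piece_moves(board, piece):
--     pieces = [(r, c) for r in range(ROW_COUNT) for c in range(COLUMN_COUNT) if board[r][c] == piece]
--     empties = [(r, c) for r in range(ROW_COUNT) for c in range(COLUMN_COUNT) if board[r][c] == 0]
--     return [(p, e) for p in pieces for e in empties]
-- ===== Notes on version B (the rewrite author's own statement) =====
-- stated objective: simpler
-- what changed: Replaced the quadruple nested scan (re-scanning the whole board for empties at every piece) by two single linear passes collecting pieces and empties, followed by a Cartesian product, preserving row-major pairing order.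
import Mathlib
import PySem

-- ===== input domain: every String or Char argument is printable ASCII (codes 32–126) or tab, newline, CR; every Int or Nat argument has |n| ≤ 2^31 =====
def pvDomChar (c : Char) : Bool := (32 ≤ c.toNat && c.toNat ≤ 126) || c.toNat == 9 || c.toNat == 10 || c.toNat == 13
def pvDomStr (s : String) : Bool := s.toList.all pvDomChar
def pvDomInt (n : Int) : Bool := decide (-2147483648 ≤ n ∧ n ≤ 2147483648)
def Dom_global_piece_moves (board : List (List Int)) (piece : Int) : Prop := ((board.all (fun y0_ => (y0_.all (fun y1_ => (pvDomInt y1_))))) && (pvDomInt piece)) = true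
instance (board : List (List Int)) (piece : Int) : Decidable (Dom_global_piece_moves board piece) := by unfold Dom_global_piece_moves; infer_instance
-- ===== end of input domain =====

-- B replaces A's quadruple nested scan (a full empty-cell rescan per piece) by two
-- linear index-gathering passes followed by a Cartesian product (objective: simpler).

-- ===== PORT A =====
-- board[r][c]; defaults only fire outside Pre_ (Python raises IndexError there)
def pvCell (board : List (List Int)) (r c : Int) : Int :=
  PySem.List.pyGetD (PySem.List.pyGetD board r []) c 0

def global_piece_moves (board : List (List Int)) (piece : Int) : List ((Int × Int) × (Int × Int)) :=
  (PySem.List.pyRange 0 5 1).foldl (fun acc r =>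
    (PySem.List.pyRange 0 5 1).foldl (fun acc c =>
      if pvCell board r c == piece then
        (PySem.List.pyRange 0 5 1).foldl (fun acc dr =>
          (PySem.List.pyRange 0 5 1).foldl (fun acc dc =>
            if pvCell board dr dc == 0 then acc ++ [((r, c), (dr, dc))] else acc) acc) acc
      else acc) acc) []

-- ===== PORT B =====
def global_piece_moves_alt (board : List (List Int)) (piece : Int) : List ((Int × Int) × (Int × Int)) :=
  let pieces := (PySem.List.pyRange 0 5 1).flatMap (fun r =>
    ((PySem.List.pyRange 0 5 1).filter (fun c => pvCell board r c == piece)).map (fun c => (r, c)))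
  let empties := (PySem.List.pyRange 0 5 1).flatMap (fun r =>
    ((PySem.List.pyRange 0 5 1).filter (fun c => pvCell board r c == 0)).map (fun c => (r, c)))
  pieces.flatMap (fun p => empties.map (fun e => (p, e)))

-- ===== PRECONDITION & SPEC =====
-- Python A indexes board[r][c] for r,c in range(5): it raises IndexError unless the
-- board has at least 5 rows and each of the first 5 rows has at least 5 columns.
def Pre_global_piece_moves (board : List (List Int)) (piece : Int) : Prop :=
  5 ≤ board.length ∧ ∀ row ∈ board.take 5, 5 ≤ row.length
instance (board : List (List Int)) (piece : Int) : Decidable (Pre_global_piece_moves board piece) := by unfold Pre_global_piece_moves; infer_instance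

def pvWitness_global_piece_moves : List (List Int) × Int :=
  ([[1,0,0,0,2],[0,0,0,0,0],[0,0,1,0,0],[0,0,0,0,0],[2,0,0,0,1]], 1)

def Spec_global_piece_moves (board : List (List Int)) (piece : Int) (out : List ((Int × Int) × (Int × Int))) : Prop := out = global_piece_moves_alt board piece
instance (board : List (List Int)) (piece : Int) (out : List ((Int × Int) × (Int × Int))) : Decidable (Spec_global_piece_moves board piece out) := by unfold Spec_global_piece_moves; infer_instance

-- ===== CLAIM (what is proved, stated in full; the proofs are below) =====
def Claim_equal_global_piece_moves : Prop := ∀ (board : List (List Int)) (piece : Int), Dom_global_piece_moves board piece → Pre_global_piece_moves board piece → Spec_global_piece_moves board piece (global_piece_moves board piece)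

-- ===== LEMMAS AND PROOFS =====

-- 'if p x: out += h(x)' loop shape
theorem pv_foldl_append_fun {α β : Type} (p : α → Bool) (h : α → List β) :
    ∀ (l : List α) (acc : List β),
    l.foldl (fun a x => if p x then a ++ h x else a) acc = acc ++ (l.filter p).flatMap h := by
  intro l
  induction l with
  | nil => intro acc; simp
  | cons x l ih =>
    intro acc
    by_cases hx : p x <;> simp [hx, ih, List.append_assoc]

theorem pv_flatMap_single {α β : Type} (f : α → β) (l : List α) :
    l.flatMap (fun x => [f x]) = l.map f := by
  induction l with
  | nil => rfl
  | cons x l ih => simp [ih]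

-- ===== VERDICT (by name: the statement is the Claim_ definition above) =====
theorem global_piece_moves_spec : Claim_equal_global_piece_moves := by
  intro board piece _ _
  unfold Spec_global_piece_moves global_piece_moves global_piece_moves_alt
  simp only [pv_foldl_append_fun, PySem.List.foldl_append_eq_flatMap,
    List.nil_append]
  simp [List.flatMap_assoc, List.map_flatMap, List.flatMap_map, List.map_map, Function.comp_def, pv_flatMap_single]
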